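-- pv_equiv track=rewrite | github.com/bensmus/box-grouping-optimization | compute_grouping_cost.py | compute_group_cost
-- ===== SOURCE A (Python) =====
-- def compute_group_cost(cells, group):
--     # `cells` and `group` are both collections of tuples.
--     cell_rows = [row for (row, _) in cells]
--     cells_height = max(cell_rows) - min(cell_rows) + 1
--     group_cost = 0
--     # Iterate through a bounding box of cells,
--     # simulating the access of group (from top to bottom).
--     group_columns = {column for (_, column) in group} # Set ensures that same column not scanned twice.
--     for column in group_columns:
--         column_subcosts = []
--         cell_above_flag = False
--         cells_above = 0 # Important for non-rectangular cell stacks.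
--         for row in range(cells_height):
--             iter_cell = (row, column)
--             if iter_cell in group:
--                 if not cell_above_flag: # Consider whether cell above was in group.
--                     column_subcosts.append(cells_above)
--                 cell_above_flag = True
--             else:
--                 cell_above_flag = False
--             if iter_cell in cells:
--                 cells_above += 1
--         column_cost = sum(column_subcosts)
--         group_cost += column_cost
--     return group_cost
-- ===== SOURCE B (Python) =====
-- def compute_group_cost(cells, group):
--     # Different strategy: instead of scanning a bounding box per column,
--     # iterate directly over the distinct group cells and add, at each
--     # vertical run start, the number of cells above it in its column.
--     rows = [r for (r, _) in cells]
--     height = max(rows) - min(rows) + 1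
--     gset = set(group)
--     cset = set(cells)
--     total = 0
--     for (r, c) in gset:
--         if 0 <= r < height and (r == 0 or (r - 1, c) not in gset):
--             total += sum(1 for rr in range(r) if (rr, c) in cset)
--     return total
-- ===== Notes on version B (the rewrite author's own statement) =====
-- stated objective: faster
-- what changed: Instead of scanning every row of the bounding box for every distinct group column with list membership tests, B iterates once over the distinct group cells, detects vertical run starts via set lookups, and counts the cells above only at those starts.
import Mathlib
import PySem

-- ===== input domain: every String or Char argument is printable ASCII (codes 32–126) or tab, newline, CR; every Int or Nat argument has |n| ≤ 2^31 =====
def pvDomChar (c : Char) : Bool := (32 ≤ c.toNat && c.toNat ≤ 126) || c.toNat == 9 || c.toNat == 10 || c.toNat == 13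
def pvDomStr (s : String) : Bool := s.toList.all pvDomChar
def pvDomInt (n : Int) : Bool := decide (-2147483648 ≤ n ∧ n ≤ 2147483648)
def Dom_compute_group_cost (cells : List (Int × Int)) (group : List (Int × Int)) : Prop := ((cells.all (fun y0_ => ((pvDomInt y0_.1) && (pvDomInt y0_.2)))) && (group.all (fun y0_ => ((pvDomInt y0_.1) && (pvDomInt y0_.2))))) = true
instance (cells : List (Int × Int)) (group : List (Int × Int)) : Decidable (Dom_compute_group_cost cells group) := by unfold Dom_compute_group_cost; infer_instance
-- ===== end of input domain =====

-- B replaces A's per-column bounding-box scan by a direct pass over the distinct group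
-- cells, adding the cells-above count only at vertical run starts (objective: faster).

-- ===== PORT A =====
-- inner loop body of A: state = (column_subcosts, cell_above_flag, cells_above)
def stepA (cells : List (Int × Int)) (group : List (Int × Int)) (column : Int)
    (st : List Int × Bool × Int) (row : Int) : List Int × Bool × Int :=
  let st1 : List Int × Bool × Int :=
    if (row, column) ∈ group then
      ((if st.2.1 then st.1 else st.1 ++ [st.2.2]), true, st.2.2)
    else (st.1, false, st.2.2)
  if (row, column) ∈ cells then (st1.1, st1.2.1, st1.2.2 + 1) else st1

def compute_group_cost (cells : List (Int × Int)) (group : List (Int × Int)) : Int :=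
  let cell_rows := cells.map Prod.fst
  match PySem.List.max? cell_rows (fun x => x), PySem.List.min? cell_rows (fun x => x) with
  | some mx, some mn =>
    let cells_height := mx - mn + 1
    let group_columns : PySem.Set Int := PySem.Set.ofList (group.map Prod.snd)
    group_columns.foldl
      (fun group_cost column =>
        let st := (PySem.List.pyRange 0 cells_height 1).foldl (stepA cells group column) ([], false, 0)
        group_cost + st.1.sum) 0
  | _, _ => 0  -- unreachable under Pre_ (Python raises ValueError on empty cells)

-- ===== PORT B =====
def compute_group_cost_alt (cells : List (Int × Int)) (group : List (Int × Int)) : Int :=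
  let rows := cells.map Prod.fst
  match PySem.List.max? rows (fun x => x) with
  | none => 0  -- unreachable under Pre_ (Python raises ValueError on empty cells)
  | some mx =>
  match PySem.List.min? rows (fun x => x) with
  | none => 0
  | some mn =>
    let height := mx - mn + 1
    let gset : PySem.Set (Int × Int) := PySem.Set.ofList group
    let cset : PySem.Set (Int × Int) := PySem.Set.ofList cells
    gset.foldl
      (fun total rc =>
        if 0 ≤ rc.1 ∧ rc.1 < height ∧ (rc.1 = 0 ∨ (rc.1 - 1, rc.2) ∉ gset) then
          total + (PySem.List.pyRange 0 rc.1 1).foldl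
            (fun acc rr => if (rr, rc.2) ∈ cset then acc + 1 else acc) 0
        else total) 0

-- ===== PRECONDITION & SPEC =====
-- Pre_ excludes exactly the inputs where Python A raises: empty `cells` (max() of an empty sequence).
def Pre_compute_group_cost (cells : List (Int × Int)) (group : List (Int × Int)) : Prop := cells ≠ []
instance (cells : List (Int × Int)) (group : List (Int × Int)) : Decidable (Pre_compute_group_cost cells group) := by unfold Pre_compute_group_cost; infer_instance
def pvWitness_compute_group_cost : (List (Int × Int)) × (List (Int × Int)) := ([(0, 0), (1, 0)], [(1, 0)])

def Spec_compute_group_cost (cells : List (Int × Int)) (group : List (Int × Int)) (out : Int) : Prop := out = compute_group_cost_alt cells group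
instance (cells : List (Int × Int)) (group : List (Int × Int)) (out : Int) : Decidable (Spec_compute_group_cost cells group out) := by unfold Spec_compute_group_cost; infer_instance

-- ===== CLAIM (what is proved, stated in full; the proofs are below) =====
def Claim_equal_compute_group_cost : Prop := ∀ (cells : List (Int × Int)) (group : List (Int × Int)), Dom_compute_group_cost cells group → Pre_compute_group_cost cells group → Spec_compute_group_cost cells group (compute_group_cost cells group)

-- ===== LEMMAS AND PROOFS =====

-- number of cells in column c at rows 0..r-1 (the "cells above" count)
def cntAbove (cells : List (Int × Int)) (c r : Int) : Int :=
  ((PySem.List.pyRange 0 r 1).countP (fun rr => decide ((rr, c) ∈ cells)) : Int)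

-- "vertical run start" condition at row r of column c (Bool so no extra Decidable instance is needed)
def isStart (group : List (Int × Int)) (c r : Int) : Bool :=
  decide ((r, c) ∈ group ∧ (r = 0 ∨ (r - 1, c) ∉ group))

-- the common value both programs compute: sum of cells-above over all in-range run starts
def Tval (cells group : List (Int × Int)) (H : Int) : Int :=
  ∑ x ∈ group.toFinset.filter (fun x => 0 ≤ x.1 ∧ x.1 < H ∧ isStart group x.2 x.1 = true),
    cntAbove cells x.2 x.1

-- per-column run-start rows, as a Finset
def Rc (group : List (Int × Int)) (H c : Int) : Finset Int :=
  ((PySem.List.pyRange 0 H 1).filter (fun r => isStart group c r)).toFinset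

-- invariant of A's inner loop over range(cells_height)
theorem A_inner (cells group : List (Int × Int)) (c : Int) (k : Nat) :
    (PySem.List.pyRange 0 (k : Int) 1).foldl (stepA cells group c) ([], false, 0) =
      (((PySem.List.pyRange 0 (k : Int) 1).filter (fun r => isStart group c r)).map
          (cntAbove cells c),
       decide (0 < (k : Int) ∧ ((k : Int) - 1, c) ∈ group),
       cntAbove cells c k) := by
  induction k with
  | zero =>
    simp [cntAbove]
  | succ k ih =>
    have hcast : ((k + 1 : Nat) : Int) = (k : Int) + 1 := by push_cast; ring
    rw [hcast, PySem.List.pyRange_one_succ_right (by positivity), List.foldl_append, ih,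
        List.filter_append, List.map_append]
    have hcnt : cntAbove cells c ((k : Int) + 1)
        = cntAbove cells c k + (if (↑k, c) ∈ cells then 1 else 0) := by
      unfold cntAbove
      rw [PySem.List.pyRange_one_succ_right (by positivity), List.countP_append]
      simp [List.countP_cons]
    simp only [List.foldl_cons, List.foldl_nil, stepA, hcnt]
    by_cases hg : ((k : Int), c) ∈ group <;> by_cases hc : ((k : Int), c) ∈ cells <;>
      by_cases hp : 0 < (k : Int) ∧ ((k : Int) - 1, c) ∈ group <;>
      (try clear ih) <;>
      simp [hg, hc, hp, isStart, List.filter_cons] <;>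
      split_ifs <;> simp_all

-- B's inner counting loop computes cntAbove
theorem cnt_fold (cells : List (Int × Int)) (c r : Int) :
    (PySem.List.pyRange 0 r 1).foldl
      (fun acc rr => if (rr, c) ∈ PySem.Set.ofList cells then acc + 1 else acc) 0
      = cntAbove cells c r := by
  rw [PySem.List.foldl_ite_add_one]
  unfold cntAbove
  have h : (fun rr => decide ((rr, c) ∈ PySem.Set.ofList cells))
      = (fun rr => decide ((rr, c) ∈ cells)) := by
    funext rr; simp [PySem.Set.mem_ofList]
  rw [h]
  simp

theorem B_eq_T (cells group : List (Int × Int)) (H : Int) :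
    (PySem.Set.ofList group).foldl
      (fun total rc =>
        if 0 ≤ rc.1 ∧ rc.1 < H ∧ (rc.1 = 0 ∨ (rc.1 - 1, rc.2) ∉ PySem.Set.ofList group) then
          total + (PySem.List.pyRange 0 rc.1 1).foldl
            (fun acc rr => if (rr, rc.2) ∈ PySem.Set.ofList cells then acc + 1 else acc) 0
        else total) 0 = Tval cells group H := by
  rw [PySem.List.foldl_ite_eq_foldl_filter, PySem.List.foldl_add]
  set L := (PySem.Set.ofList group).filter
      (fun rc => decide (0 ≤ rc.1 ∧ rc.1 < H ∧ (rc.1 = 0 ∨ (rc.1 - 1, rc.2) ∉ PySem.Set.ofList group)))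
    with hL
  have hmap : L.map (fun rc => (PySem.List.pyRange 0 rc.1 1).foldl
      (fun acc rr => if (rr, rc.2) ∈ PySem.Set.ofList cells then acc + 1 else acc) 0)
      = L.map (fun rc => cntAbove cells rc.2 rc.1) := by
    apply List.map_congr_left; intro x _; exact cnt_fold cells x.2 x.1
  rw [hmap]
  have hnd : L.Nodup := (PySem.Set.nodup_ofList (xs := group)).filter _
  have hTF : L.toFinset
      = group.toFinset.filter (fun x => 0 ≤ x.1 ∧ x.1 < H ∧ isStart group x.2 x.1 = true) := by
    ext x
    simp only [hL, List.mem_toFinset, List.mem_filter, Finset.mem_filter,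
      PySem.Set.mem_ofList, decide_eq_true_iff, isStart]
    tauto
  rw [← List.sum_toFinset _ hnd, hTF]
  unfold Tval
  simp

theorem A_eq_T (cells group : List (Int × Int)) (H : Int) (hH : 0 ≤ H) :
    (PySem.Set.ofList (group.map Prod.snd)).foldl
      (fun group_cost column =>
        let st := (PySem.List.pyRange 0 H 1).foldl (stepA cells group column) ([], false, 0)
        group_cost + st.1.sum) 0 = Tval cells group H := by
  have hcast : ((H.toNat : Nat) : Int) = H := Int.toNat_of_nonneg hH
  -- 1. the outer fold is a sum over the distinct columns
  rw [PySem.List.foldl_add (g := fun column =>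
    ((PySem.List.pyRange 0 H 1).foldl (stepA cells group column) ([], false, 0)).1.sum)]
  -- 2. characterise the inner loop with A_inner
  have hcol : ∀ c : Int,
      ((PySem.List.pyRange 0 H 1).foldl (stepA cells group c) ([], false, 0)).1.sum
        = ∑ r ∈ Rc group H c, cntAbove cells c r := by
    intro c
    have h1 := A_inner cells group c H.toNat
    rw [hcast] at h1
    rw [h1, Rc, List.sum_toFinset _ (List.Nodup.filter _ (PySem.List.nodup_pyRange_one 0 H))]
  have hmapc : (PySem.Set.ofList (group.map Prod.snd)).map (fun column =>
      ((PySem.List.pyRange 0 H 1).foldl (stepA cells group column) ([], false, 0)).1.sum)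
      = (PySem.Set.ofList (group.map Prod.snd)).map (fun c => ∑ r ∈ Rc group H c, cntAbove cells c r) := by
    apply List.map_congr_left; intro c _; exact hcol c
  rw [hmapc, ← List.sum_toFinset _ (PySem.Set.nodup_ofList (xs := group.map Prod.snd))]
  -- 3. fiberwise: the sum over columns of per-column sums is the sum over all start pairs
  have hC : (PySem.Set.ofList (group.map Prod.snd)).toFinset = (group.map Prod.snd).toFinset := by
    ext c; simp [PySem.Set.mem_ofList]
  rw [hC]
  unfold Tval
  set S := group.toFinset.filter (fun x => 0 ≤ x.1 ∧ x.1 < H ∧ isStart group x.2 x.1 = true) with hS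
  rw [← Finset.sum_fiberwise_of_maps_to (g := Prod.snd)
      (t := (group.map Prod.snd).toFinset)
      (fun x hx => by
        simp only [hS, Finset.mem_filter, List.mem_toFinset] at hx
        simp only [List.mem_toFinset, List.mem_map]
        exact ⟨x, hx.1, rfl⟩)
      (fun x => cntAbove cells x.2 x.1)]
  rw [zero_add]
  apply Finset.sum_congr rfl
  intro c _
  have hfib : (Rc group H c).map ⟨fun r => ((r, c) : Int × Int), fun a b h => by
      simpa using congrArg Prod.fst h⟩ = S.filter (fun x => x.2 = c) := by
    ext x
    simp only [Finset.mem_map, Function.Embedding.coeFn_mk, Finset.mem_filter, hS,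
      Rc, List.mem_toFinset, List.mem_filter, PySem.List.mem_pyRange_one,
      decide_eq_true_iff, isStart]
    constructor
    · rintro ⟨r, ⟨⟨h0, hr⟩, hst⟩, rfl⟩
      exact ⟨⟨hst.1, h0, hr, hst⟩, rfl⟩
    · rintro ⟨⟨hg, h0, hr, hst⟩, hc⟩
      obtain ⟨r, cc⟩ := x
      subst hc
      exact ⟨r, ⟨⟨h0, hr⟩, hst⟩, rfl⟩
  rw [← hfib, Finset.sum_map]
  simp

-- ===== VERDICT (by name: the statement is the Claim_ definition above) =====
theorem compute_group_cost_spec : Claim_equal_compute_group_cost := by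
  intro cells group _ hpre
  unfold Spec_compute_group_cost compute_group_cost compute_group_cost_alt
  have hmapne : cells.map Prod.fst ≠ [] := by
    cases cells with
    | nil => exact absurd rfl hpre
    | cons y ys => simp
  obtain ⟨mx, hmx⟩ : ∃ mx, PySem.List.max? (cells.map Prod.fst) (fun x => x) = some mx := by
    cases h : PySem.List.max? (cells.map Prod.fst) (fun x => x) with
    | none => exact absurd ((PySem.List.max?_eq_none_iff _ _).mp h) hmapne
    | some mx => exact ⟨mx, rfl⟩
  obtain ⟨mn, hmn⟩ : ∃ mn, PySem.List.min? (cells.map Prod.fst) (fun x => x) = some mn := by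
    cases h : PySem.List.min? (cells.map Prod.fst) (fun x => x) with
    | none => exact absurd ((PySem.List.min?_eq_none_iff _ _).mp h) hmapne
    | some mn => exact ⟨mn, rfl⟩
  have hH : 0 ≤ mx - mn + 1 := by
    obtain ⟨y, ys, rfl⟩ : ∃ y ys, cells = y :: ys := by
      cases cells with
      | nil => exact absurd rfl hpre
      | cons y ys => exact ⟨y, ys, rfl⟩
    have hy : y.1 ∈ (y :: ys).map Prod.fst := by simp
    have h1 := PySem.List.min?_isMin hmn y.1 hy
    have h2 := PySem.List.max?_isMax hmx y.1 hy
    omega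
  simp only [hmx, hmn]
  rw [A_eq_T cells group (mx - mn + 1) hH, B_eq_T cells group (mx - mn + 1)]
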